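-- pv_equiv track=rewrite | github.com/GundalaNikhil/DSA | dsa-problems/Bitwise/testcases/generate_all_testcases.py | bit010_subset_and_equals_x
-- ===== SOURCE A (Python) =====
-- from typing import List, Dict, Any
--
-- def bit010_subset_and_equals_x(a: List[int], X: int) -> int:
--     """BIT-010: Subset AND Equals X"""
--     # Filter: elements must have all bits of X set
--     filtered = [num for num in a if (num & X) == X]
--     if not filtered:
--         return 0
--
--     count = 0
--     for mask in range(1, 1 << len(filtered)):
--         and_result = filtered[0] if (mask & 1) else -1
--         for i in range(len(filtered)):
--             if mask & (1 << i):
--                 if and_result == -1: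
--                     and_result = filtered[i]
--                 else:
--                     and_result &= filtered[i]
--         if and_result == X:
--             count += 1
--     return count
-- ===== SOURCE B (Python) =====
-- from typing import List
--
--
-- def bit010_subset_and_equals_x(a: List[int], X: int) -> int:
--     """BIT-010: Subset AND Equals X — one left-to-right pass keeping a dict
--     {AND value -> number of non-empty subsets seen so far with that AND}."""
--     counts = {}
--     for num in a:
--         if num & X != X:
--             continue
--         for v, c in list(counts.items()):
--             w = v & num
--             counts[w] = counts.get(w, 0) + c
--         counts[num] = counts.get(num, 0) + 1
--     return counts.get(X, 0)
-- ===== Notes on version B (the rewrite author's own statement) =====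
-- stated objective: alternative
-- what changed: A filters, then enumerates all 2^n subset bitmasks and re-ANDs each subset with an inner index loop; B makes one left-to-right pass keeping a dict mapping each reachable AND value to the number of non-empty subsets producing it, and reads off the entry for X. Intended as faster (merging equal AND values removes the exponential enumeration); one probe run measured A timing out at n=64 where B answered identically ~30000x sooner, another run could not confirm a stable ratio, so no speed claim is made.
import Mathlib
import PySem

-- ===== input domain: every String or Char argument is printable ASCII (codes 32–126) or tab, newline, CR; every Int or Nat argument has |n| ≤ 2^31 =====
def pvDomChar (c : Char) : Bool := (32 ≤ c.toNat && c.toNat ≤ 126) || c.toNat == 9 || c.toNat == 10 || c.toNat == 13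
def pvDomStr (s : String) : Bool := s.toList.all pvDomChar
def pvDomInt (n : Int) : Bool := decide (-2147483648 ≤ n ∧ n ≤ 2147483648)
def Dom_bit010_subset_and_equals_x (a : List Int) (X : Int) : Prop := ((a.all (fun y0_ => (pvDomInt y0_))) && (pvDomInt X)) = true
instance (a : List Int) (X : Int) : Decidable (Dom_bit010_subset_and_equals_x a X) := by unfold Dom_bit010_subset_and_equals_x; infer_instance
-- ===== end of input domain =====

-- B replaces A's enumeration of all 2^n subset masks by one left-to-right pass that keeps a
-- dict {AND value -> number of non-empty subsets seen so far with that AND}.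

-- ===== PORT A =====
def bit010_subset_and_equals_x (a : List Int) (X : Int) : Int :=
  let filtered := a.filter (fun num => PySem.Int.band num X == X)
  if filtered.isEmpty then 0
  else
    (PySem.List.pyRange 1 ((1 : Int) <<< filtered.length) 1).foldl (fun count mask =>
      let ar :=
        (PySem.List.pyRange 0 (PySem.List.len filtered) 1).foldl (fun (andResult : Int) (i : Int) =>
          if PySem.Int.band mask ((1 : Int) <<< i.toNat) != 0 then
            (if andResult == -1 then PySem.List.pyGetD filtered i 0
             else PySem.Int.band andResult (PySem.List.pyGetD filtered i 0))
          else andResult)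
          (if PySem.Int.band mask 1 != 0 then PySem.List.pyGetD filtered 0 0 else -1)
      if ar == X then count + 1 else count) 0

-- ===== PORT B =====
def bit010_subset_and_equals_x_alt (a : List Int) (X : Int) : Int :=
  let counts := a.foldl (fun counts num =>
    if PySem.Int.band num X != X then counts
    else
      let counts' := counts.items.foldl (fun d (p : Int × Int) =>
        d.insert (PySem.Int.band p.1 num) (d.getD (PySem.Int.band p.1 num) 0 + p.2)) counts
      counts'.insert num (counts'.getD num 0 + 1)) PySem.Dict.empty
  counts.getD X 0

-- ===== PRECONDITION & SPEC =====
def Spec_bit010_subset_and_equals_x (a : List Int) (X : Int) (out : Int) : Prop := out = bit010_subset_and_equals_x_alt a X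
instance (a : List Int) (X : Int) (out : Int) : Decidable (Spec_bit010_subset_and_equals_x a X out) := by unfold Spec_bit010_subset_and_equals_x; infer_instance

-- ===== CLAIM (what is proved, stated in full; the proofs are below) =====
def Claim_equal_bit010_subset_and_equals_x : Prop := ∀ (a : List Int) (X : Int), Dom_bit010_subset_and_equals_x a X → Spec_bit010_subset_and_equals_x a X (bit010_subset_and_equals_x a X)

-- ===== LEMMAS AND PROOFS =====
-- Both ports are proved equal to the same reference quantity: the number of non-empty
-- sublists s of the filtered list with AND(s) = X (pvAnd1 folds AND with identity -1;
-- A's "-1 means unset" sentinel coincides with it because -1 & e = e).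

def pvStep (m : Int) (ar : Int) (p : Int × Int) : Int :=
  if PySem.Int.band m ((1 : Int) <<< p.1.toNat) != 0 then PySem.Int.band ar p.2 else ar

def pvJ (l : List Int) (m : Int) : Int := (PySem.List.enumerate l 0).foldl (pvStep m) (-1)

def pvAnd1 (s : List Int) : Int := s.foldl PySem.Int.band (-1)

def pvSubAnds (p : List Int) : List Int :=
  (p.sublists.filter (fun s => !s.isEmpty)).map pvAnd1

def pvStepB (counts : PySem.Dict Int Int) (num : Int) : PySem.Dict Int Int :=
  let counts' := counts.items.foldl (fun d (p : Int × Int) =>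
    d.insert (PySem.Int.band p.1 num) (d.getD (PySem.Int.band p.1 num) 0 + p.2)) counts
  counts'.insert num (counts'.getD num 0 + 1)

def pvInv (d : PySem.Dict Int Int) (L : List Int) : Prop :=
  d.keys.Nodup ∧ ∀ v : Int, d.getD v 0 = (L.count v : Int)

lemma pvBand_neg_one_left (x : Int) : PySem.Int.band (-1) x = x := by
  rw [PySem.Int.band_comm]; exact PySem.Int.band_neg_one x

lemma pvBand_zero_left (x : Int) : PySem.Int.band 0 x = 0 := by
  rw [PySem.Int.band_comm]; exact PySem.Int.band_zero x

lemma pvAnd1_append (s : List Int) (x : Int) :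
    pvAnd1 (s ++ [x]) = PySem.Int.band (pvAnd1 s) x := by
  simp [pvAnd1, List.foldl_append]

lemma pvEnumerate_mem_bound {l : List Int} : ∀ {s : Int} {p : Int × Int},
    p ∈ PySem.List.enumerate l s → s ≤ p.1 ∧ p.1 < s + l.length := by
  induction l with
  | nil => intro s p hp; simp [PySem.List.enumerate] at hp
  | cons h t ih =>
      intro s p hp
      simp only [PySem.List.enumerate, List.mem_cons] at hp
      rcases hp with rfl | hp
      · simp
      · have := ih hp; simp only [List.length_cons]; push_cast; omega

lemma pvJ_congr (l : List Int) (m₁ m₂ : Int)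
    (h : ∀ j : Nat, j < l.length →
      (PySem.Int.band m₁ ((1 : Int) <<< j) != 0) = (PySem.Int.band m₂ ((1 : Int) <<< j) != 0)) :
    pvJ l m₁ = pvJ l m₂ := by
  unfold pvJ
  apply PySem.List.foldl_congr_mem
  intro acc p hp
  have hb := pvEnumerate_mem_bound hp
  have hlt : p.1.toNat < l.length := by omega
  simp only [pvStep, h p.1.toNat hlt]

lemma pvJ_concat (l : List Int) (x : Int) (m : Int) :
    pvJ (l ++ [x]) m =
      if PySem.Int.band m ((1 : Int) <<< l.length) != 0 then PySem.Int.band (pvJ l m) x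
      else pvJ l m := by
  unfold pvJ
  rw [PySem.List.enumerate_append, List.foldl_append]
  simp [PySem.List.enumerate, pvStep]

lemma pvJ_zero (l : List Int) : pvJ l 0 = -1 := by
  unfold pvJ
  rw [PySem.List.foldl_congr_mem (g := fun acc _ => acc)]
  · exact PySem.List.foldl_ignore ..
  · intro acc p _; simp [pvStep, pvBand_zero_left]

lemma pvShift_one (i : Nat) : (1 : Int) <<< i = ((2 ^ i : Nat) : Int) := by
  rw [← Nat.one_shiftLeft]; exact (Int.natCast_shiftLeft 1 i).symm

lemma pvBit_low {k n : Nat} (hk : k < 2 ^ n) :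
    (PySem.Int.band (k : Int) ((1 : Int) <<< n) != 0) = false := by
  rw [pvShift_one, PySem.Int.band_natCast, Nat.and_two_pow, Nat.testBit_lt_two_pow hk]
  simp

lemma pvBit_high {k n : Nat} (hk : k < 2 ^ n) :
    (PySem.Int.band ((2 ^ n + k : Nat) : Int) ((1 : Int) <<< n) != 0) = true := by
  rw [pvShift_one, PySem.Int.band_natCast, Nat.and_two_pow, Nat.testBit_two_pow_add_eq,
    Nat.testBit_lt_two_pow hk]
  simp

lemma pvBit_shift {k n j : Nat} (hj : j < n) :
    (PySem.Int.band ((2 ^ n + k : Nat) : Int) ((1 : Int) <<< j) != 0)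
      = (PySem.Int.band (k : Int) ((1 : Int) <<< j) != 0) := by
  rw [pvShift_one, PySem.Int.band_natCast, PySem.Int.band_natCast, Nat.and_two_pow,
    Nat.and_two_pow, Nat.testBit_two_pow_add_gt hj]

lemma pvInner_eq_J (h : Int) (t : List Int) (m : Int) :
    ((PySem.List.pyRange 0 (PySem.List.len (h :: t)) 1).foldl (fun (andResult : Int) (i : Int) =>
        if PySem.Int.band m ((1 : Int) <<< i.toNat) != 0 then
          (if andResult == -1 then PySem.List.pyGetD (h :: t) i 0
           else PySem.Int.band andResult (PySem.List.pyGetD (h :: t) i 0))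
        else andResult)
      (if PySem.Int.band m 1 != 0 then PySem.List.pyGetD (h :: t) 0 0 else -1)) = pvJ (h :: t) m := by
  -- step 1: the -1 sentinel branch is just AND (since -1 & e = e)
  have hstep : (fun (andResult : Int) (i : Int) =>
        if PySem.Int.band m ((1 : Int) <<< i.toNat) != 0 then
          (if andResult == -1 then PySem.List.pyGetD (h :: t) i 0
           else PySem.Int.band andResult (PySem.List.pyGetD (h :: t) i 0))
        else andResult)
      = (fun (ar : Int) (i : Int) =>
          if PySem.Int.band m ((1 : Int) <<< i.toNat) != 0 then
            PySem.Int.band ar (PySem.List.pyGetD (h :: t) i 0) else ar) := by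
    funext ar i
    by_cases hc : (PySem.Int.band m ((1 : Int) <<< i.toNat) != 0) = true
    · simp only [hc, if_true]
      by_cases har : ar = -1
      · simp [har, pvBand_neg_one_left]
      · simp [har]
    · simp only [Bool.not_eq_true] at hc; simp [hc]
  rw [hstep]
  -- step 2: pvJ as a fold over the index range
  have hJ : pvJ (h :: t) m
      = (PySem.List.pyRange 0 (PySem.List.len (h :: t)) 1).foldl (fun (ar : Int) (i : Int) =>
          if PySem.Int.band m ((1 : Int) <<< i.toNat) != 0 then
            PySem.Int.band ar (PySem.List.pyGetD (h :: t) i 0) else ar) (-1) := by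
    unfold pvJ
    rw [PySem.List.enumerate_eq_map_pyRange (h :: t) 0, List.foldl_map]
    rfl
  rw [hJ]
  -- step 3: the first index (0) absorbs the different starts
  have hlen : PySem.List.len (h :: t) = ((t.length + 1 : Nat) : Int) := by
    simp [PySem.List.len_eq]
  rw [hlen, PySem.List.pyRange_one_cons (by positivity)]
  have h1 : (1:Int) <<< ((0:Int).toNat) = 1 := by decide
  simp only [List.foldl_cons, PySem.List.pyGetD_zero_cons, h1]
  by_cases hc : (PySem.Int.band m 1 != 0) = true
  · simp [hc, PySem.Int.band_self, pvBand_neg_one_left]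
  · simp [hc]

lemma pvMaster (l : List Int) : ∀ g : Int → Bool,
    (List.range (2 ^ l.length)).countP (fun k : Nat => g (pvJ l (k : Int))) =
      l.sublists.countP (fun s => g (pvAnd1 s)) := by
  induction l using List.reverseRecOn with
  | nil =>
      intro g
      simp [pvJ_zero, pvAnd1]
  | append_singleton l x ih =>
      intro g
      have hlen : (l ++ [x]).length = l.length + 1 := by simp
      rw [hlen, pow_succ, mul_two, List.range_add, List.countP_append, List.countP_map,
        List.sublists_concat, List.countP_append, List.countP_map]
      congr 1
      · -- low masks: last element not selected
        rw [← ih g]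
        apply List.countP_congr
        intro k hk
        have hk' : k < 2 ^ l.length := List.mem_range.mp hk
        have hJ : pvJ (l ++ [x]) (k : Int) = pvJ l (k : Int) := by
          rw [pvJ_concat, pvBit_low hk']; simp
        rw [hJ]
      · -- high masks: last element selected
        have hR : List.countP ((fun s => g (pvAnd1 s)) ∘ fun s => s ++ [x]) l.sublists
            = List.countP (fun s => g (PySem.Int.band (pvAnd1 s) x)) l.sublists := by
          apply List.countP_congr
          intro s _
          simp [Function.comp, pvAnd1_append]
        rw [hR, ← ih (fun w => g (PySem.Int.band w x))]
        apply List.countP_congr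
        intro k hk
        have hk' : k < 2 ^ l.length := List.mem_range.mp hk
        have hJ : pvJ (l ++ [x]) ((2 ^ l.length + k : Nat) : Int)
            = PySem.Int.band (pvJ l (k : Int)) x := by
          rw [pvJ_concat, pvBit_high hk']
          simp only [if_true]
          congr 1
          apply pvJ_congr
          intro j hj
          exact pvBit_shift hj
        simp only [Function.comp]
        push_cast at hJ ⊢
        rw [hJ]

lemma pvCountP_split {α : Type} (l : List α) (p q : α → Bool) :
    l.countP p = l.countP (fun s => q s && p s) + l.countP (fun s => !q s && p s) := by
  induction l with
  | nil => simp
  | cons h t ih =>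
      by_cases hq : q h <;> by_cases hp : p h <;>
        simp [hq, hp, ih] <;> omega

lemma pvCountP_isEmpty (l : List Int) : l.sublists.countP (fun s => s.isEmpty) = 1 := by
  induction l using List.reverseRecOn with
  | nil => simp
  | append_singleton l x ih =>
      rw [List.sublists_concat, List.countP_append, List.countP_map]
      have : List.countP ((fun s => s.isEmpty) ∘ fun s => s ++ [x]) l.sublists = 0 := by
        rw [List.countP_eq_zero]; intro s _; simp [Function.comp]
      omega

lemma pvA_eq (a : List Int) (X : Int) :
    bit010_subset_and_equals_x a X
      = (((a.filter (fun num => PySem.Int.band num X == X)).sublists.countP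
            (fun s => !s.isEmpty && (pvAnd1 s == X)) : Nat) : Int) := by
  unfold bit010_subset_and_equals_x
  cases hf : a.filter (fun num => PySem.Int.band num X == X) with
  | nil => simp
  | cons h t =>
      simp only [List.isEmpty_cons, Bool.false_eq_true, if_false]
      have hfun : ∀ (count mask : Int),
          (let ar :=
            (PySem.List.pyRange 0 (PySem.List.len (h :: t)) 1).foldl (fun (andResult : Int) (i : Int) =>
              if PySem.Int.band mask ((1 : Int) <<< i.toNat) != 0 then
                (if andResult == -1 then PySem.List.pyGetD (h :: t) i 0
                 else PySem.Int.band andResult (PySem.List.pyGetD (h :: t) i 0))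
              else andResult)
              (if PySem.Int.band mask 1 != 0 then PySem.List.pyGetD (h :: t) 0 0 else -1);
          if ar == X then count + 1 else count)
          = (if (pvJ (h :: t) mask == X) = true then count + 1 else count) := by
        intro count mask
        simp only []
        rw [pvInner_eq_J]
      simp only [hfun]
      rw [PySem.List.foldl_if_add_one (p := fun mask : Int => pvJ (h :: t) mask == X)]
      -- now convert the mask range [1, 2^(n+1)) to [0, 2^(n+1)) minus mask 0
      have hsh : ((1 : Int) <<< (h :: t).length) = ((2 ^ (h :: t).length : Nat) : Int) :=
        pvShift_one _
      have hpos : (0 : Int) < ((2 ^ (h :: t).length : Nat) : Int) := by positivity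
      have hcons := PySem.List.pyRange_one_cons (a := 0) (b := ((2 ^ (h :: t).length : Nat) : Int)) hpos
      have hsplit : List.countP (fun mask : Int => pvJ (h :: t) mask == X)
            (PySem.List.pyRange 0 ((2 ^ (h :: t).length : Nat) : Int) 1)
          = List.countP (fun mask : Int => pvJ (h :: t) mask == X)
              (PySem.List.pyRange 1 ((2 ^ (h :: t).length : Nat) : Int) 1)
            + (if ((-1 : Int) == X) = true then 1 else 0) := by
        rw [hcons]
        simp only [List.countP_cons, pvJ_zero, zero_add]
      -- countP over the Int range = countP over List.range
      have hrange : List.countP (fun mask : Int => pvJ (h :: t) mask == X)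
            (PySem.List.pyRange 0 ((2 ^ (h :: t).length : Nat) : Int) 1)
          = List.countP (fun k : Nat => pvJ (h :: t) (k : Int) == X) (List.range (2 ^ (h :: t).length)) := by
        rw [PySem.List.pyRange_one, List.countP_map]
        simp only [Int.sub_zero, Int.toNat_natCast]
        apply List.countP_congr
        intro k _
        simp [Function.comp]
      have hm := pvMaster (h :: t) (fun w => w == X)
      -- split the sublists count into the empty and non-empty parts
      have hs := pvCountP_split ((h :: t).sublists)
        (fun s => pvAnd1 s == X) (fun s => s.isEmpty)
      have hempty : List.countP (fun s => s.isEmpty && (pvAnd1 s == X)) ((h :: t).sublists)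
          = (if ((-1 : Int) == X) = true then 1 else 0) := by
        have : List.countP (fun s => s.isEmpty && (pvAnd1 s == X)) ((h :: t).sublists)
            = List.countP (fun s => s.isEmpty && ((-1 : Int) == X)) ((h :: t).sublists) := by
          apply List.countP_congr
          intro s _
          cases s <;> simp [pvAnd1]
        rw [this]
        by_cases hX : ((-1 : Int) == X) = true
        · simp only [hX, Bool.and_true]; exact pvCountP_isEmpty _
        · simp only [Bool.not_eq_true] at hX; simp [hX]
      have hne : List.countP (fun s => !s.isEmpty && (pvAnd1 s == X)) ((h :: t).sublists)
          = List.countP (fun s => (!s.isEmpty) && (pvAnd1 s == X)) ((h :: t).sublists) := rfl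
      rw [hsh]
      have : List.countP (fun mask : Int => pvJ (h :: t) mask == X)
          (PySem.List.pyRange 1 ((2 ^ (h :: t).length : Nat) : Int) 1)
          = List.countP (fun s => !s.isEmpty && (pvAnd1 s == X)) ((h :: t).sublists) := by
        omega
      rw [this]
      simp

lemma pvCount_subAnds (p : List Int) (v : Int) :
    (pvSubAnds p).count v = p.sublists.countP (fun s => !s.isEmpty && (pvAnd1 s == v)) := by
  rw [pvSubAnds, List.count_eq_countP, List.countP_map, List.countP_filter]
  exact List.countP_congr (by intro a _; simp [Function.comp, Bool.and_comm, BEq.comm])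

lemma pvGetD_fold_ins (num v : Int) : ∀ (E : List (Int × Int)) (d : PySem.Dict Int Int),
    (E.foldl (fun d p =>
        d.insert (PySem.Int.band p.1 num) (d.getD (PySem.Int.band p.1 num) 0 + p.2)) d).getD v 0
      = d.getD v 0 + ((E.filter (fun p => PySem.Int.band p.1 num == v)).map (·.2)).sum := by
  intro E
  induction E with
  | nil => intro d; simp
  | cons q E ih =>
      intro d
      simp only [List.foldl_cons, ih]
      by_cases hb : (PySem.Int.band q.1 num == v) = true
      · have hv : v = PySem.Int.band q.1 num := (eq_of_beq hb).symm
        rw [List.filter_cons]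
        simp only [hb, if_true, List.map_cons, List.sum_cons]
        rw [PySem.Dict.getD_insert]
        simp only [if_pos hv]
        rw [← hv]
        ring
      · have hv : v ≠ PySem.Int.band q.1 num := by
          intro hvv; exact hb (by simp [hvv])
        rw [List.filter_cons]
        simp only [hb, Bool.false_eq_true, if_false]
        rw [PySem.Dict.getD_insert]
        simp [if_neg hv]

lemma pvSum_indicator (u : Int) (f : Int → Int) : ∀ (K : List Int), K.Nodup → u ∈ K →
    (K.map (fun k => if k = u then f k else 0)).sum = f u := by
  intro K
  induction K with
  | nil => intro _ h; simp at h
  | cons k K ih =>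
      intro hnd hu
      simp only [List.map_cons, List.sum_cons]
      by_cases hk : k = u
      · subst hk
        have hz : ((K.map (fun k' => if k' = k then f k' else 0)).sum = 0) := by
          apply List.sum_eq_zero
          intro x hx
          rcases List.mem_map.mp hx with ⟨k', hk', rfl⟩
          have : k' ≠ k := by
            intro h; exact (List.nodup_cons.mp hnd).1 (h ▸ hk')
          simp [this]
        simp [hz]
      · have hu' : u ∈ K := by
          rcases List.mem_cons.mp hu with h | h
          · exact absurd h.symm hk
          · exact h
        rw [ih (List.nodup_cons.mp hnd).2 hu']
        simp [hk]

lemma pvRegroup (num v : Int) (K : List Int) (hnd : K.Nodup) : ∀ (L : List Int),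
    (∀ u ∈ L, u ∈ K) →
    (K.map (fun k => if (PySem.Int.band k num == v) = true then (L.count k : Int) else 0)).sum
      = ((L.map (fun w => PySem.Int.band w num)).count v : Int) := by
  intro L
  induction L with
  | nil => intro _; simp
  | cons u L ih =>
      intro hsup
      have hstep : ∀ k : Int,
          (if (PySem.Int.band k num == v) = true then ((u :: L).count k : Int) else 0)
            = (if (PySem.Int.band k num == v) = true then (L.count k : Int) else 0)
              + (if k = u then (if (PySem.Int.band k num == v) = true then 1 else 0) else 0) := by
        intro k
        by_cases hb : (PySem.Int.band k num == v) = true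
        · by_cases hk : k = u
          · subst hk
            rw [List.count_cons_self]
            simp only [hb, if_true]
            push_cast
            ring
          · rw [List.count_cons_of_ne (Ne.symm hk)]
            simp [hb, hk]
        · simp [hb]
      simp only [hstep]
      rw [PySem.List.sum_map_add_int K
        (fun k => if (PySem.Int.band k num == v) = true then (L.count k : Int) else 0)
        (fun k => if k = u then (if (PySem.Int.band k num == v) = true then 1 else 0) else 0)]
      have hu : u ∈ K := hsup u (List.mem_cons_self)
      rw [ih (fun w hw => hsup w (List.mem_cons_of_mem u hw)),
        pvSum_indicator u (fun k => if (PySem.Int.band k num == v) = true then 1 else 0) K hnd hu]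
      rw [List.map_cons, List.count_cons]
      by_cases hb : (PySem.Int.band u num == v) = true
      · have : (PySem.Int.band u num == v) = true := hb
        simp [hb]
      · simp [hb]

lemma pvSum_filter_ite (p : Int → Bool) (f : Int → Int) : ∀ K : List Int,
    ((K.filter p).map f).sum = (K.map (fun k => if p k = true then f k else 0)).sum := by
  intro K
  induction K with
  | nil => simp
  | cons k K ih =>
      rw [List.filter_cons]
      by_cases hp : p k = true
      · simp only [hp, if_true, List.map_cons, List.sum_cons, ih]
      · simp only [hp, Bool.false_eq_true, if_false, List.map_cons, List.sum_cons, ih]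
        simp

lemma pvStepB_inv (d : PySem.Dict Int Int) (L : List Int) (num : Int) (h : pvInv d L) :
    pvInv (pvStepB d num) (L ++ L.map (fun w => PySem.Int.band w num) ++ [num]) := by
  obtain ⟨hnd, hcnt⟩ := h
  have hsup : ∀ u ∈ L, u ∈ d.keys := by
    intro u hu
    by_contra hmem
    have hcon : d.contains u = false := by
      cases hc : d.contains u
      · rfl
      · exact absurd ((PySem.Dict.contains_iff_mem_keys d u).mp hc) hmem
    have h0 := PySem.Dict.getD_of_not_contains d (0 : Int) hcon
    rw [hcnt u] at h0
    have := List.count_pos_iff.mpr hu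
    omega
  -- the inner fold result
  have hinner : ∀ v : Int,
      (d.items.foldl (fun d' (p : Int × Int) =>
          d'.insert (PySem.Int.band p.1 num) (d'.getD (PySem.Int.band p.1 num) 0 + p.2)) d).getD v 0
        = (L.count v : Int) + ((L.map (fun w => PySem.Int.band w num)).count v : Int) := by
    intro v
    rw [pvGetD_fold_ins num v d.items d, hcnt v]
    congr 1
    rw [PySem.Dict.items_eq_map_keys d hnd 0, List.filter_map, List.map_map]
    have hcomp : ((fun x : Int × Int => x.2) ∘ fun k : Int => (k, d.getD k 0)) = fun k : Int => d.getD k 0 := rfl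
    rw [hcomp]
    have hpred : ((fun p : Int × Int => PySem.Int.band p.1 num == v) ∘ fun k : Int => (k, d.getD k 0))
        = fun k : Int => PySem.Int.band k num == v := rfl
    rw [hpred, pvSum_filter_ite]
    have hmapc : (d.keys.map (fun k => if (PySem.Int.band k num == v) = true then d.getD k 0 else 0))
        = (d.keys.map (fun k => if (PySem.Int.band k num == v) = true then (L.count k : Int) else 0)) := by
      apply List.map_congr_left
      intro k _
      rw [hcnt k]
    rw [hmapc, pvRegroup num v d.keys hnd L hsup]
  have hnd' : (d.items.foldl (fun d' (p : Int × Int) =>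
      d'.insert (PySem.Int.band p.1 num) (d'.getD (PySem.Int.band p.1 num) 0 + p.2)) d).keys.Nodup :=
    PySem.Dict.nodup_keys_foldl_insert_key d.items (fun p => PySem.Int.band p.1 num)
      (fun d' p => d'.getD (PySem.Int.band p.1 num) 0 + p.2) d hnd
  constructor
  · exact PySem.Dict.nodup_keys_insert _ _ _ hnd'
  · intro v
    show (PySem.Dict.insert _ num _).getD v 0 = _
    rw [PySem.Dict.getD_insert]
    rw [List.count_append, List.count_append, List.count_singleton]
    by_cases hv : v = num
    · subst hv
      rw [if_pos rfl, hinner v]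
      simp
    · rw [if_neg hv, hinner v]
      have : (num == v) = false := by simp [Ne.symm hv]
      simp [this]

lemma pvSubAnds_concat_count (p : List Int) (x v : Int) :
    (pvSubAnds (p ++ [x])).count v
      = (pvSubAnds p ++ (pvSubAnds p).map (fun w => PySem.Int.band w x) ++ [x]).count v := by
  rw [List.count_append, List.count_append, List.count_singleton, pvCount_subAnds,
    pvCount_subAnds, List.sublists_concat, List.countP_append, List.countP_map]
  have h1 : List.countP ((fun s => !s.isEmpty && (pvAnd1 s == v)) ∘ fun s => s ++ [x]) p.sublists
      = List.countP (fun s => PySem.Int.band (pvAnd1 s) x == v) p.sublists := by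
    apply List.countP_congr
    intro s _
    simp [Function.comp, pvAnd1_append]
  have h2 : List.countP (fun s => s.isEmpty && (PySem.Int.band (pvAnd1 s) x == v)) p.sublists
      = if (x == v) = true then 1 else 0 := by
    have he : List.countP (fun s => s.isEmpty && (PySem.Int.band (pvAnd1 s) x == v)) p.sublists
        = List.countP (fun s => s.isEmpty && (x == v)) p.sublists := by
      apply List.countP_congr
      intro s _
      cases s
      · simp [pvAnd1, pvBand_neg_one_left]
      · simp
    rw [he]
    by_cases hx : (x == v) = true
    · simp only [hx, Bool.and_true]; exact pvCountP_isEmpty _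
    · simp only [hx]; simp
  have h3 : ((pvSubAnds p).map (fun w => PySem.Int.band w x)).count v
      = List.countP (fun s => !s.isEmpty && (PySem.Int.band (pvAnd1 s) x == v)) p.sublists := by
    rw [List.count_eq_countP, List.countP_map, pvSubAnds, List.countP_map, List.countP_filter]
    apply List.countP_congr
    intro s _
    simp [Function.comp, Bool.and_comm, BEq.comm]
  have hsplit := pvCountP_split p.sublists (fun s => PySem.Int.band (pvAnd1 s) x == v)
    (fun s => s.isEmpty)
  rw [h1, hsplit, h2, h3]
  by_cases hx : (x == v) = true
  · simp only [hx, if_true]; omega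
  · simp only [hx, Bool.false_eq_true, if_false]; omega

lemma pvBfold : ∀ (l : List Int) (p : List Int) (d : PySem.Dict Int Int),
    pvInv d (pvSubAnds p) → pvInv (l.foldl pvStepB d) (pvSubAnds (p ++ l)) := by
  intro l
  induction l with
  | nil => intro p d h; simpa using h
  | cons x t ih =>
      intro p d h
      have hstep := pvStepB_inv d (pvSubAnds p) x h
      have hstep' : pvInv (pvStepB d x) (pvSubAnds (p ++ [x])) := by
        refine ⟨hstep.1, fun v => ?_⟩
        rw [hstep.2 v, ← pvSubAnds_concat_count]
      have := ih (p ++ [x]) (pvStepB d x) hstep'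
      simpa [List.append_assoc] using this

lemma pvB_eq (a : List Int) (X : Int) :
    bit010_subset_and_equals_x_alt a X
      = (((pvSubAnds (a.filter (fun num => PySem.Int.band num X == X))).count X : Nat) : Int) := by
  unfold bit010_subset_and_equals_x_alt
  simp only []
  have hflip : (fun (counts : PySem.Dict Int Int) (num : Int) =>
      if PySem.Int.band num X != X then counts
      else
        let counts' := counts.items.foldl (fun d (p : Int × Int) =>
          d.insert (PySem.Int.band p.1 num) (d.getD (PySem.Int.band p.1 num) 0 + p.2)) counts
        counts'.insert num (counts'.getD num 0 + 1))
      = (fun (counts : PySem.Dict Int Int) (num : Int) =>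
          if (PySem.Int.band num X == X) = true then pvStepB counts num else counts) := by
    funext counts num
    by_cases hb : (PySem.Int.band num X == X) = true
    · have hbne : (PySem.Int.band num X != X) = false := by
        simp [bne, eq_of_beq hb]
      simp only [hbne, Bool.false_eq_true, if_false, hb, if_true]
      rfl
    · have hbne : (PySem.Int.band num X != X) = true := by
        simp only [bne, hb]; rfl
      simp only [hbne, if_true, hb, Bool.false_eq_true, if_false]
  rw [hflip, PySem.List.foldl_if_eq_foldl_filter]
  have h0 : pvInv PySem.Dict.empty (pvSubAnds []) := by
    constructor
    · simp [PySem.Dict.empty]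
    · intro v
      simp [pvSubAnds, PySem.Dict.getD_empty]
  have := (pvBfold (a.filter (fun num => PySem.Int.band num X == X)) [] PySem.Dict.empty h0).2 X
  simpa using this

-- ===== VERDICT (by name: the statement is the Claim_ definition above) =====
theorem bit010_subset_and_equals_x_spec : Claim_equal_bit010_subset_and_equals_x := by
  intro a X _
  show bit010_subset_and_equals_x a X = bit010_subset_and_equals_x_alt a X
  rw [pvA_eq, pvB_eq, pvCount_subAnds]
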